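-- pv_equiv track=rewrite | github.com/kooznitsa/python_algorithms | greedy/huffman.py | create_heap
-- ===== SOURCE A (Python) =====
-- import heapq
--
-- def create_heap(text: str) -> list:
--     """Given a string (e. g. 'abacabad'):
--     1. Count letters in the string (counter list).
--     2. Take 2 smallest values and assign 0 and 1, respectively.
--     3. Add tuples to a heap [('c', '0'), ('d', '1')].
--     4. Concatenate letters ('cd'), add to the counter.
--     5. Repeat 2–4.
--     Return a list of tuples:
--     [('c', '0'), ('d', '1'), ('b', '0'), ('cd', '1'), ('a', '0'), ('bcd', '1')].
--     """
--     counter = sorted({(text.count(i), i) for i in text})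
--     heap = []
--
--     if len(set(text)) < 2:
--         return [(0, text)]
--
--     while len(counter) > 1:
--         min_0, min_1 = heapq.nsmallest(2, counter)
--         heap.extend([(0, min_0[1]), (1, min_1[1])])
--
--         heapq.heappop(counter)
--         heapq.heappop(counter)
--
--         new_value = tuple(map(lambda x: x[0] + x[1], zip(min_0, min_1)))
--         heapq.heappush(counter, new_value)
--
--     return heap
-- ===== SOURCE B (Python) =====
-- def _insert_sorted(m, rest):
--     """Insert m into the ascending-sorted list rest, keeping it sorted."""
--     if not rest or m < rest[0]:
--         return [m] + rest
--     return [rest[0]] + _insert_sorted(m, rest[1:])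
--
--
-- def create_heap(text: str) -> list:
--     counts = {}
--     for ch in text:
--         counts[ch] = counts.get(ch, 0) + 1
--     if len(counts) < 2:
--         return [(0, text)]
--     items = sorted((n, ch) for ch, n in counts.items())
--     result = []
--     while len(items) > 1:
--         m0, m1 = items[0], items[1]
--         result.append((0, m0[1]))
--         result.append((1, m1[1]))
--         items = _insert_sorted((m0[0] + m1[0], m0[1] + m1[1]), items[2:])
--     return result
-- ===== Notes on version B (the rewrite author's own statement) =====
-- stated objective: faster
-- what changed: B counts characters in one dict pass instead of calling text.count(i) for every position (O(n^2)), and runs the greedy merge on a sorted list with ordered insertion of each merged pair instead of a heap rescanned with heapq.nsmallest each iteration.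
import Mathlib
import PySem

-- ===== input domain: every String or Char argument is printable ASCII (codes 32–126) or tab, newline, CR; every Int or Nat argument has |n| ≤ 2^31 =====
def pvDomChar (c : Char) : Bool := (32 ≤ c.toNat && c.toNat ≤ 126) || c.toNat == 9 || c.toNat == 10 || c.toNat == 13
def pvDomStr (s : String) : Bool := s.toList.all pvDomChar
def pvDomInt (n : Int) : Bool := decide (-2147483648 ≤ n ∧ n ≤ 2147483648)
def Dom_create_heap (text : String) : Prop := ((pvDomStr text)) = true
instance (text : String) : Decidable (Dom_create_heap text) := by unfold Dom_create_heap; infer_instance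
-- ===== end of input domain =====

-- B replaces A's O(n^2) per-position text.count counting by one dict pass and the
-- heapq/nsmallest merge loop by a sorted list with ordered insertion (objective: faster).

-- Elements of the working list are Python tuples (count, letters), compared lexicographically
-- (Python tuple/str comparison = the Lex order on Int × List Char).
abbrev pvK : Type := Lex (Int × List Char)

-- ===== PORT A =====
-- Hand port of CPython's heapq._siftdown(heap, startpos, pos) (newitem = heap[pos] read first);
-- exact step for step: bubble newitem up while it is smaller than its parent.
def pvSiftdownAux {α : Type} [LinearOrder α] (heap : List α) (startpos pos : Nat) (newitem : α) : List α :=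
  if _h : startpos < pos then
    match heap[(pos - 1) / 2]? with
    | some parent =>
      if newitem < parent then
        pvSiftdownAux (heap.set pos parent) startpos ((pos - 1) / 2) newitem
      else heap.set pos newitem
    | none => heap.set pos newitem
  else heap.set pos newitem
termination_by pos
decreasing_by omega

-- Hand port of CPython's heapq._siftup(heap, pos) (newitem = heap[pos] read first): move the
-- hole at pos down to a leaf, always to the smaller child, then bubble newitem up by _siftdown.
def pvSiftupAux {α : Type} [LinearOrder α] (heap : List α) (startpos pos : Nat) (newitem : α) : List α :=
  if _h : 2 * pos + 1 < heap.length then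
    let childpos := if 2 * pos + 2 < heap.length ∧
        ¬ (heap.getD (2 * pos + 1) newitem < heap.getD (2 * pos + 2) newitem)
      then 2 * pos + 2 else 2 * pos + 1
    pvSiftupAux (heap.set pos (heap.getD childpos newitem)) startpos childpos newitem
  else pvSiftdownAux (heap.set pos newitem) startpos pos newitem
termination_by heap.length - pos
decreasing_by simp only [List.length_set]; split <;> omega

-- heapq.heappush: append, then sift the new item up from the last position.
def pvHeappush {α : Type} [LinearOrder α] (heap : List α) (item : α) : List α :=
  pvSiftdownAux (heap ++ [item]) 0 heap.length item

-- heapq.heappop: pop the last element, move it to the root, sift it down (none = IndexError on []).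
def pvHeappop {α : Type} [LinearOrder α] (heap : List α) : Option (α × List α) :=
  match heap.getLast? with
  | none => none
  | some lastelt =>
    match heap.dropLast with
    | [] => some (lastelt, [])
    | r :: t => some (r, pvSiftupAux ((r :: t).set 0 lastelt) 0 0 lastelt)

-- heapq.nsmallest(2, xs): the two smallest elements in ascending order = sorted(xs)[:2]
-- (the documented semantics of the library call).
def pvNsmallest2 (xs : List pvK) : List pvK :=
  (PySem.List.sorted xs (fun x => x) false).take 2

-- A's while loop: counter is a heapq heap, heap is the accumulated output list.
-- The fuel argument (= counter.length at the call) only makes the recursion structural;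
-- it never runs out, since every pass shortens counter by one.
def pvMergeLoopA : Nat → List pvK → List (Int × List Char) → List (Int × List Char)
  | 0, _, heap => heap
  | fuel + 1, counter, heap =>
    if 1 < counter.length then
      match pvNsmallest2 counter with
      | m0 :: m1 :: _ =>
        let heap' := heap ++ [(0, (ofLex m0).2), (1, (ofLex m1).2)]
        match pvHeappop counter with
        | some (_, c1) =>
          match pvHeappop c1 with
          | some (_, c2) =>
            -- new_value = tuple(map(lambda x: x[0]+x[1], zip(min_0, min_1))): pairwise add/concat
            pvMergeLoopA fuel (pvHeappush c2 (toLex ((ofLex m0).1 + (ofLex m1).1, (ofLex m0).2 ++ (ofLex m1).2))) heap'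
          | none => heap'   -- unreachable: c1 ≠ [] when 1 < counter.length
        | none => heap'     -- unreachable: counter ≠ []
      | _ => heap           -- unreachable: nsmallest(2, counter) has 2 elements when 1 < counter.length
    else heap

def create_heap (text : String) : List (Int × String) :=
  let cs := text.toList
  -- counter = sorted({(text.count(i), i) for i in text}): the set of distinct (count, letter)
  -- tuples (PySem.Set), then sorted; the 1-char-needle count is PySem.Chars.count cs [c].
  let counter := PySem.List.sorted
    (PySem.Set.ofList (cs.map (fun c => toLex ((PySem.Chars.count cs [c] : Int), [c]))))
    (fun x => x) false
  if (PySem.Set.ofList cs).length < 2 then [(0, text)]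
  else (pvMergeLoopA counter.length counter []).map (fun p => (p.1, String.ofList p.2))

-- ===== PORT B =====
-- _insert_sorted(m, rest): insert m into the sorted list rest, after elements ≤ m.
def pvInsort (m : pvK) : List pvK → List pvK
  | [] => [m]
  | x :: xs => if m < x then m :: x :: xs else x :: pvInsort m xs

-- B's while loop over the sorted list `items`, accumulating `result`
-- (fuel = items.length at the call: a structural-recursion guard that never runs out).
def pvMergeLoopB : Nat → List pvK → List (Int × List Char) → List (Int × List Char)
  | 0, _, result => result
  | fuel + 1, items, result =>
    match items with
    | m0 :: m1 :: rest =>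
      pvMergeLoopB fuel
        (pvInsort (toLex ((ofLex m0).1 + (ofLex m1).1, (ofLex m0).2 ++ (ofLex m1).2)) rest)
        (result ++ [(0, (ofLex m0).2), (1, (ofLex m1).2)])
    | _ => result

def create_heap_alt (text : String) : List (Int × String) :=
  let cs := text.toList
  -- counts[ch] = counts.get(ch, 0) + 1 over the text, one pass
  let counts : PySem.Dict Char Int := cs.foldl (fun d c => d.insert c (d.getD c 0 + 1)) PySem.Dict.empty
  if counts.size < 2 then [(0, text)]
  else
    let items := PySem.List.sorted
      (counts.items.map (fun p => toLex ((p.2 : Int), [p.1]))) (fun x => x) false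
    (pvMergeLoopB items.length items []).map (fun p => (p.1, String.ofList p.2))

-- ===== PRECONDITION & SPEC =====
def Spec_create_heap (text : String) (out : List (Int × String)) : Prop := out = create_heap_alt text
instance (text : String) (out : List (Int × String)) : Decidable (Spec_create_heap text out) := by unfold Spec_create_heap; infer_instance

-- ===== CLAIM (what is proved, stated in full; the proofs are below) =====
def Claim_equal_create_heap : Prop := ∀ (text : String), Dom_create_heap text → Spec_create_heap text (create_heap text)

-- ===== LEMMAS AND PROOFS =====

def pvLeAt {α : Type} [LinearOrder α] (l : List α) (i j : Nat) : Prop :=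
  ∀ x ∈ l[i]?, ∀ y ∈ l[j]?, x ≤ y

def pvIsHeap {α : Type} [LinearOrder α] (l : List α) : Prop :=
  ∀ j : Nat, 0 < j → pvLeAt l ((j - 1) / 2) j

def pvHeapExceptUp {α : Type} [LinearOrder α] (l : List α) (pos : Nat) : Prop :=
  (∀ j : Nat, 0 < j → j ≠ pos → pvLeAt l ((j - 1) / 2) j) ∧
  (∀ c : Nat, 0 < pos → 0 < c → (c - 1) / 2 = pos → pvLeAt l ((pos - 1) / 2) c)

def pvHoleInv {α : Type} [LinearOrder α] (l : List α) (pos : Nat) : Prop :=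
  (∀ j : Nat, 0 < j → j ≠ pos → (j - 1) / 2 ≠ pos → pvLeAt l ((j - 1) / 2) j) ∧
  (∀ c : Nat, 0 < pos → 0 < c → (c - 1) / 2 = pos → pvLeAt l ((pos - 1) / 2) c)

theorem pvLeAt_of_getElem {α : Type} [LinearOrder α] {l : List α} {i j : Nat}
    (h : ∀ (hi : i < l.length) (hj : j < l.length), l[i] ≤ l[j]) : pvLeAt l i j := by
  intro x hx y hy
  simp only [Option.mem_def, List.getElem?_eq_some_iff] at hx hy
  obtain ⟨hi, rfl⟩ := hx; obtain ⟨hj, rfl⟩ := hy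
  exact h hi hj

theorem pvLeAt_get {α : Type} [LinearOrder α] {l : List α} {i j : Nat}
    (hle : pvLeAt l i j) (hi : i < l.length) (hj : j < l.length) : l[i] ≤ l[j] :=
  hle _ (Option.mem_def.mpr (List.getElem?_eq_some_iff.mpr ⟨hi, rfl⟩)) _
    (Option.mem_def.mpr (List.getElem?_eq_some_iff.mpr ⟨hj, rfl⟩))

theorem pvSetSwapPerm {α : Type} [LinearOrder α] (l : List α) (p q : Nat) (x : α)
    (hpq : p ≠ q) (hp : p < l.length) (hq : q < l.length) :
    ((l.set p (l[q]'hq)).set q x).Perm (l.set p x) := by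
  rw [List.perm_iff_count]
  intro b
  rw [List.count_set (by simpa using hq), List.count_set (by simpa using hp),
      List.count_set hp]
  rw [List.getElem_set_ne (by first | (simp only [List.length_set]; omega) | omega)]
  have hcnt : (if (l[q]'hq == b) = true then 1 else 0) ≤ List.count b l := by
    split
    · rename_i hb
      exact List.count_pos_iff.mpr (by
        have : l[q]'hq = b := by simpa using hb
        rw [← this]; exact List.getElem_mem hq)
    · omega
  omega

theorem pvSiftdown_spec {α : Type} [LinearOrder α] (pos : Nat) (l : List α) (newitem : α)
    (hlt : pos < l.length) (hinv : pvHeapExceptUp (l.set pos newitem) pos) :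
    pvIsHeap (pvSiftdownAux l 0 pos newitem) ∧
      (pvSiftdownAux l 0 pos newitem).Perm (l.set pos newitem) := by
  induction pos using Nat.strong_induction_on generalizing l with
  | _ pos ih =>
  rcases Nat.eq_zero_or_pos pos with rfl | hpos
  · rw [pvSiftdownAux, dif_neg (by first | (simp only [List.length_set]; omega) | omega)]
    refine ⟨fun j hj => hinv.1 j hj (by first | (simp only [List.length_set]; omega) | omega), List.Perm.refl _⟩
  · have hpp : (pos - 1) / 2 < pos := by omega
    have hppl : (pos - 1) / 2 < l.length := by omega
    rw [pvSiftdownAux, dif_pos hpos, List.getElem?_eq_getElem hppl]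
    set pp := (pos - 1) / 2 with hppdef
    set parent := l[pp]'hppl with hpar
    simp only []
    have hvpp : (l.set pos newitem)[pp]'(by simpa using hppl) = parent := by
      rw [List.getElem_set_ne (by first | (simp only [List.length_set]; omega) | omega)]
    by_cases hc : newitem < parent
    · rw [if_pos hc]
      have hlen2 : pp < (l.set pos parent).length := by simpa using hppl
      have harg : ((l.set pos parent).set pp newitem).Perm (l.set pos newitem) := by
        have := pvSetSwapPerm l pos pp newitem (by first | (simp only [List.length_set]; omega) | omega) hlt hppl
        exact this
      refine (fun h => ⟨h.1, h.2.trans harg⟩) (ih pp hpp (l.set pos parent) hlen2 ?_)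
      -- the invariant for the recursive call
      set v := l.set pos newitem with hv
      set w := (l.set pos parent).set pp newitem with hw
      have hwlen : w.length = l.length := by simp [hw]
      have hvlen : v.length = l.length := by simp [hv]
      have wval : ∀ j : Nat, j ≠ pp → j ≠ pos → (hj : j < l.length) →
          w[j]'(by first | (simp only [List.length_set]; omega) | omega) = l[j]'hj := by
        intro j h1 h2 hj
        rw [List.getElem_set_ne (by first | (simp only [List.length_set]; omega) | omega), List.getElem_set_ne (by first | (simp only [List.length_set]; omega) | omega)]
      have vval : ∀ j : Nat, j ≠ pos → (hj : j < l.length) → v[j]'(by first | (simp only [List.length_set]; omega) | omega) = l[j]'hj := by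
        intro j h2 hj; rw [List.getElem_set_ne (by first | (simp only [List.length_set]; omega) | omega)]
      have wpp : w[pp]'(by first | (simp only [List.length_set]; omega) | omega) = newitem := List.getElem_set_self (by first | (simp only [List.length_set]; omega) | omega)
      have wpos : w[pos]'(by first | (simp only [List.length_set]; omega) | omega) = parent := by
        rw [List.getElem_set_ne (by first | (simp only [List.length_set]; omega) | omega), List.getElem_set_self (by first | (simp only [List.length_set]; omega) | omega)]
      have vpos : v[pos]'(by first | (simp only [List.length_set]; omega) | omega) = newitem := List.getElem_set_self (by first | (simp only [List.length_set]; omega) | omega)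
      constructor
      · intro j hj hjpp
        apply pvLeAt_of_getElem
        intro hi hjw
        rw [hwlen] at hjw
        by_cases hjpos : j = pos
        · subst hjpos
          have hi' : (j - 1) / 2 = pp := rfl
          simp only [hi', wpp, wpos]
          exact hc.le
        · by_cases hjp : (j - 1) / 2 = pp
          · -- sibling of pos: w[pp]=newitem ≤ v[j] = w[j]
            simp only [hjp, wpp, wval j (by first | (simp only [List.length_set]; omega) | omega) hjpos hjw]
            have := pvLeAt_get (hinv.1 j hj hjpos) (by rw [hvlen]; omega) (by first | (simp only [List.length_set]; omega) | omega)
            rw [vval _ hjpos hjw] at this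
            simp only [hjp] at this
            rw [vval pp (by first | (simp only [List.length_set]; omega) | omega) hppl] at this
            exact le_trans hc.le this
          · by_cases hjq : (j - 1) / 2 = pos
            · -- child of pos: w[pos] = parent ≤ v[j] = w[j]
              simp only [hjq, wpos, wval j (by first | (simp only [List.length_set]; omega) | omega) hjpos hjw]
              have := pvLeAt_get (hinv.2 j hpos hj hjq) (by rw [hvlen]; omega) (by first | (simp only [List.length_set]; omega) | omega)
              rw [vval _ hjpos hjw] at this
              rw [vval pp (by first | (simp only [List.length_set]; omega) | omega) hppl] at this
              exact this
            · -- untouched edge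
              have hpe : (j - 1) / 2 < j := by omega
              rw [wval _ hjp hjq (by first | (simp only [List.length_set]; omega) | omega), wval j (by first | (simp only [List.length_set]; omega) | omega) hjpos hjw]
              have := pvLeAt_get (hinv.1 j hj hjpos) (by rw [hvlen]; omega) (by first | (simp only [List.length_set]; omega) | omega)
              rw [vval _ hjpos hjw, vval _ hjq (by first | (simp only [List.length_set]; omega) | omega)] at this
              exact this
      · intro c hpp0 hc0 hcp
        apply pvLeAt_of_getElem
        intro hi hjw
        rw [hwlen] at hjw
        have hcgt : pp < c := by omega
        have hppp : (pp - 1) / 2 < pp := by omega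
        have hpppl : (pp - 1) / 2 < l.length := by omega
        have e1 : w[(pp-1)/2]'(by first | (simp only [List.length_set]; omega) | omega) = l[(pp-1)/2]'hpppl :=
          wval _ (by first | (simp only [List.length_set]; omega) | omega) (by first | (simp only [List.length_set]; omega) | omega) hpppl
        have hedge : l[(pp-1)/2]'hpppl ≤ l[pp]'hppl := by
          have := pvLeAt_get (hinv.1 pp hpp0 (by first | (simp only [List.length_set]; omega) | omega)) (by rw [hvlen]; omega) (by rw [hvlen]; omega)
          rw [vval _ (by first | (simp only [List.length_set]; omega) | omega) hpppl, vval _ (by first | (simp only [List.length_set]; omega) | omega) hppl] at this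
          exact this
        by_cases hcpos : c = pos
        · subst hcpos
          rw [e1, wpos]
          exact hedge
        · rw [e1, wval c (by first | (simp only [List.length_set]; omega) | omega) hcpos hjw]
          have h2 := pvLeAt_get (hinv.1 c hc0 hcpos) (by rw [hvlen]; omega) (by rw [hvlen]; omega)
          rw [vval _ hcpos hjw] at h2
          simp only [hcp] at h2
          rw [vval _ (by first | (simp only [List.length_set]; omega) | omega) hppl] at h2
          exact le_trans hedge h2
    · rw [if_neg hc]
      refine ⟨?_, List.Perm.refl _⟩
      intro j hj
      by_cases hjpos : j = pos
      · subst hjpos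
        apply pvLeAt_of_getElem
        intro hi hjw
        simp only [List.length_set] at hjw
        rw [List.getElem_set_ne (by first | (simp only [List.length_set]; omega) | omega), List.getElem_set_self (by first | (simp only [List.length_set]; omega) | omega)]
        exact le_of_not_gt hc
      · exact hinv.1 j hj hjpos

theorem pvSiftupGo {α : Type} [LinearOrder α] (n : Nat) :
    ∀ (l : List α) (pos : Nat) (newitem : α), l.length - pos ≤ n → pos < l.length →
    pvHoleInv l pos →
    pvIsHeap (pvSiftupAux l 0 pos newitem) ∧
      (pvSiftupAux l 0 pos newitem).Perm (l.set pos newitem) := by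
  induction n with
  | zero => intro l pos newitem hn hlt _; omega
  | succ n ih =>
  intro l pos newitem hn hlt hinv
  rw [pvSiftupAux]
  by_cases h : 2 * pos + 1 < l.length
  · rw [dif_pos h]
    simp only []
    set c := if 2 * pos + 2 < l.length ∧
        ¬ (l.getD (2 * pos + 1) newitem < l.getD (2 * pos + 2) newitem)
      then 2 * pos + 2 else 2 * pos + 1 with hcdef
    have hcrange : c = 2 * pos + 1 ∨ (c = 2 * pos + 2 ∧ 2 * pos + 2 < l.length) := by
      rw [hcdef]; split
      · rename_i hx; exact Or.inr ⟨rfl, hx.1⟩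
      · exact Or.inl rfl
    have hcl : c < l.length := by rcases hcrange with h1 | ⟨h1, h2⟩ <;> omega
    have hcpos : pos < c := by rcases hcrange with h1 | ⟨h1, _⟩ <;> omega
    have hgd : l.getD c newitem = l[c]'hcl := List.getD_eq_getElem l newitem hcl
    have hcmin : ∀ s : Nat, (s - 1) / 2 = pos → 0 < s → s ≠ c → (hs : s < l.length) →
        l[c]'hcl ≤ l[s]'hs := by
      intro s hsp hs0 hsc hs
      have hs12 : s = 2 * pos + 1 ∨ s = 2 * pos + 2 := by omega
      rcases hcrange with hc1 | ⟨hc2, hlen2⟩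
      · -- c = left; s must be right, and condition was false
        have hsr : s = 2 * pos + 2 := by omega
        subst hsr
        have : ¬ (2 * pos + 2 < l.length ∧
            ¬ (l.getD (2 * pos + 1) newitem < l.getD (2 * pos + 2) newitem)) := by
          intro hx
          rw [hcdef] at hc1; rw [if_pos hx] at hc1; omega
        have hlt' : l.getD (2 * pos + 1) newitem < l.getD (2 * pos + 2) newitem := by
          by_contra hk; exact this ⟨hs, hk⟩
        rw [List.getD_eq_getElem l newitem (by omega), List.getD_eq_getElem l newitem hs] at hlt'
        have : l[c]'hcl = l[2*pos+1]'(by omega) := by simp only [hc1]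
        rw [this]; exact le_of_lt hlt'
      · -- c = right, condition true: l[right] ≤ l[left]; s = left
        have hsl : s = 2 * pos + 1 := by omega
        subst hsl
        have hx : 2 * pos + 2 < l.length ∧
            ¬ (l.getD (2 * pos + 1) newitem < l.getD (2 * pos + 2) newitem) := by
          by_contra hk
          rw [hcdef, if_neg hk] at hc2; omega
        have := hx.2
        rw [List.getD_eq_getElem l newitem hs, List.getD_eq_getElem l newitem (by omega)] at this
        have he : l[c]'hcl = l[2*pos+2]'(by omega) := by simp only [hc2]
        rw [he]; exact le_of_not_gt this
    -- invariant for the recursive call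
    have hinv2 : pvHoleInv (l.set pos (l.getD c newitem)) c := by
      have lval : ∀ j : Nat, j ≠ pos → (hj : j < l.length) →
          (l.set pos (l.getD c newitem))[j]'(by simpa using hj) = l[j]'hj := by
        intro j hjp hj; rw [List.getElem_set_ne (by omega)]
      have lpos : (l.set pos (l.getD c newitem))[pos]'(by simpa using hlt) = l[c]'hcl := by
        rw [List.getElem_set_self (by simpa using hlt), hgd]
      constructor
      · intro j hj0 hjc hjpc
        apply pvLeAt_of_getElem
        intro hi hj
        simp only [List.length_set] at hj
        by_cases hjpos : j = pos
        · subst hjpos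
          rw [lpos]
          have hp0 : 0 < j := hj0
          rw [lval _ (by omega) (by omega)]
          have hcp : (c - 1) / 2 = j := by omega
          exact pvLeAt_get (hinv.2 c hj0 (by omega) hcp) (by omega) hcl
        · by_cases hpj : (j - 1) / 2 = pos
          · -- j is the sibling of c
            have : (l.set pos (l.getD c newitem))[(j-1)/2]'hi = l[c]'hcl := by
              simp only [hpj]; exact lpos
            rw [this, lval _ hjpos hj]
            exact hcmin j hpj hj0 hjc hj
          · rw [lval _ hpj (by omega), lval _ hjpos hj]
            exact pvLeAt_get (hinv.1 j hj0 hjpos hpj) (by omega) hj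
      · intro d _ hd0 hdc
        apply pvLeAt_of_getElem
        intro hi hj
        simp only [List.length_set] at hj
        have hdpos : d ≠ pos := by omega
        have hcpar : (c - 1) / 2 = pos := by omega
        have : (l.set pos (l.getD c newitem))[(c-1)/2]'hi = l[c]'hcl := by
          simp only [hcpar]; exact lpos
        rw [this, lval _ hdpos hj]
        have hgot := pvLeAt_get (hinv.1 d hd0 hdpos (by omega)) (by omega) hj
        simp only [hdc] at hgot
        exact hgot
    have hrec := ih (l.set pos (l.getD c newitem)) c newitem
      (by simp only [List.length_set]; omega) (by simpa using hcl) hinv2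
    refine ⟨hrec.1, hrec.2.trans ?_⟩
    have : (l.set pos (l.getD c newitem)) = l.set pos (l[c]'hcl) := by rw [hgd]
    rw [this]
    exact pvSetSwapPerm l pos c newitem (by omega) hlt hcl
  · rw [dif_neg h]
    have hsets : (l.set pos newitem).set pos newitem = l.set pos newitem := List.set_set ..
    have hspec := pvSiftdown_spec pos (l.set pos newitem) newitem (by simpa using hlt) ?_
    · rwa [hsets] at hspec
    · rw [hsets]
      constructor
      · intro j hj0 hjpos
        apply pvLeAt_of_getElem
        intro hi hj
        simp only [List.length_set] at hj
        by_cases hpj : (j - 1) / 2 = pos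
        · omega   -- child of pos would have index ≥ 2*pos+1 ≥ l.length
        · rw [List.getElem_set_ne (by omega), List.getElem_set_ne (by omega)]
          exact pvLeAt_get (hinv.1 j hj0 hjpos hpj) (by omega) (by omega)
      · intro d _ hd0 hdc
        apply pvLeAt_of_getElem
        intro hi hj
        simp only [List.length_set] at hj
        omega

theorem pvHeappush_spec {α : Type} [LinearOrder α] (h : List α) (x : α) (hh : pvIsHeap h) :
    pvIsHeap (pvHeappush h x) ∧ (pvHeappush h x).Perm (x :: h) := by
  unfold pvHeappush
  have hlen : h.length < (h ++ [x]).length := by simp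
  have hself : (h ++ [x]).set h.length x = h ++ [x] := by
    apply List.ext_getElem?
    intro i
    rw [List.getElem?_set]
    split
    · rename_i hi; subst hi
      simp
    · rfl
  have hspec := pvSiftdown_spec h.length (h ++ [x]) x hlen ?_
  · rw [hself] at hspec
    exact ⟨hspec.1, hspec.2.trans (List.perm_append_singleton x h)⟩
  · rw [hself]
    constructor
    · intro j hj0 hjne
      apply pvLeAt_of_getElem
      intro hi hj
      simp only [List.length_append, List.length_singleton] at hj
      have hjlt : j < h.length := by omega
      rw [List.getElem_append_left (by omega), List.getElem_append_left (by omega)]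
      exact pvLeAt_get (hh j hj0) (by omega) (by omega)
    · intro c _ hc0 hcp
      apply pvLeAt_of_getElem
      intro hi hj
      simp only [List.length_append, List.length_singleton] at hj
      omega

theorem pvHeappop_spec {α : Type} [LinearOrder α] (r : α) (t : List α) (hh : pvIsHeap (r :: t)) :
    ∃ h' : List α, pvHeappop (r :: t) = some (r, h') ∧ pvIsHeap h' ∧ h'.Perm t := by
  rcases List.eq_nil_or_concat t with rfl | ⟨mid, L, rfl⟩
  · refine ⟨[], rfl, ?_, List.Perm.refl _⟩
    intro j hj0 x hx y hy
    simp at hy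
  · rw [List.concat_eq_append] at hh ⊢
    have hgl : (r :: (mid ++ [L])).getLast? = some L := by
      rw [List.getLast?_eq_some_iff]
      exact ⟨r :: mid, by simp⟩
    have hdl : (r :: (mid ++ [L])).dropLast = r :: mid := by
      rw [show r :: (mid ++ [L]) = (r :: mid) ++ [L] by simp, List.dropLast_concat]
    refine ⟨pvSiftupAux ((r :: mid).set 0 L) 0 0 L, ?_, ?_⟩
    · unfold pvHeappop
      rw [hgl, hdl]
    · have hm : (r :: mid).set 0 L = L :: mid := rfl
      have hlen : (0 : Nat) < (L :: mid).length := by simp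
      have hmval : ∀ i : Nat, (hi : i < (L :: mid).length) → 0 < i →
          (L :: mid)[i]'hi = (r :: (mid ++ [L]))[i]'(by simp at hi ⊢; omega) := by
        intro i hi h0
        match i, h0 with
        | Nat.succ k, _ =>
          simp only [List.getElem_cons_succ]
          rw [List.getElem_append_left (by simpa using hi)]
      have hinv : pvHoleInv (L :: mid) 0 := by
        constructor
        · intro j hj0 hjne hpj
          apply pvLeAt_of_getElem
          intro hi hj
          rw [hmval _ hi (by omega), hmval _ hj (by omega)]
          exact pvLeAt_get (hh j hj0) (by simp at hi ⊢; omega) (by simp at hj ⊢; omega)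
        · intro c h0 _ _
          exact absurd h0 (lt_irrefl 0)
      have hspec := pvSiftupGo ((L :: mid).length) (L :: mid) 0 L (by omega) hlen hinv
      rw [hm]
      refine ⟨hspec.1, hspec.2.trans ?_⟩
      have : (L :: mid).set 0 L = L :: mid := rfl
      rw [this]
      exact (List.perm_append_singleton L mid).symm

theorem pvRoot_min {α : Type} [LinearOrder α] (r : α) (t : List α) (hh : pvIsHeap (r :: t)) :
    ∀ x ∈ r :: t, r ≤ x := by
  have key : ∀ j : Nat, ∀ hj : j < (r :: t).length, r ≤ (r :: t)[j] := by
    intro j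
    induction j using Nat.strong_induction_on with
    | _ j ih =>
      intro hj
      rcases Nat.eq_zero_or_pos j with rfl | hpos
      · simp
      · have hpar : (j - 1) / 2 < j := by omega
        have h1 := ih _ hpar (by omega)
        have h2 := hh j hpos
        have := h2 ((r :: t)[(j-1)/2]'(by omega)) (by simp) ((r :: t)[j]'hj) (by simp)
        exact le_trans h1 this
  intro x hx
  obtain ⟨j, hj, rfl⟩ := List.mem_iff_getElem.mp hx
  exact key j hj

theorem pvSorted_isHeap {α : Type} [LinearOrder α] (l : List α)
    (h : l.Pairwise (· ≤ ·)) : pvIsHeap l := by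
  intro j hj x hx y hy
  rcases Nat.lt_or_ge j l.length with hjl | hjl
  · rcases Nat.lt_or_ge ((j-1)/2) l.length with hpl | hpl
    · rw [List.getElem?_eq_getElem hjl] at hy
      rw [List.getElem?_eq_getElem hpl] at hx
      simp at hx hy; subst hx; subst hy
      exact (List.pairwise_iff_getElem.mp h) _ _ _ _ (by omega)
    · simp [List.getElem?_eq_none_iff.mpr hpl] at hx
  · simp [List.getElem?_eq_none_iff.mpr hjl] at hy

theorem pvInsort_perm (m : pvK) (l : List pvK) : (pvInsort m l).Perm (m :: l) := by
  induction l with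
  | nil => simp [pvInsort]
  | cons x xs ih =>
    simp only [pvInsort]; split
    · exact List.Perm.refl _
    · exact (ih.cons x).trans (List.Perm.swap m x xs)

theorem pvInsort_pairwise (m : pvK) (l : List pvK) (h : l.Pairwise (· ≤ ·)) :
    (pvInsort m l).Pairwise (· ≤ ·) := by
  induction l with
  | nil => simp [pvInsort]
  | cons x xs ih =>
    rw [List.pairwise_cons] at h
    simp only [pvInsort]; split
    · rename_i hm
      refine List.pairwise_cons.mpr ⟨?_, List.pairwise_cons.mpr h⟩
      intro y hy
      rcases List.mem_cons.mp hy with rfl | hy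
      · exact le_of_lt hm
      · exact le_of_lt (lt_of_lt_of_le hm (h.1 y hy))
    · rename_i hm
      refine List.pairwise_cons.mpr ⟨?_, ih h.2⟩
      intro y hy
      have : y ∈ m :: xs := (pvInsort_perm m xs).mem_iff.mp hy
      rcases List.mem_cons.mp this with rfl | hy'
      · exact le_of_not_gt hm
      · exact h.1 y hy'

theorem pvCountGoCons (c h : Char) (t : List Char) (n acc : Nat) :
    PySem.Chars.count.go [c] (n+1) (h :: t) acc =
      if c == h then PySem.Chars.count.go [c] n t (acc+1) else PySem.Chars.count.go [c] n t acc := by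
  rw [PySem.Chars.count.go]
  simp [List.isPrefixOf]

theorem pvCountGoNil (c : Char) (fuel acc : Nat) : PySem.Chars.count.go [c] fuel [] acc = acc := by
  cases fuel <;> rw [PySem.Chars.count.go] <;> simp

theorem pvCountGo (c : Char) (l : List Char) : ∀ fuel acc, l.length ≤ fuel →
    PySem.Chars.count.go [c] fuel l acc = acc + l.count c := by
  induction l with
  | nil => intro fuel acc _; simp [pvCountGoNil]
  | cons h t ih =>
    intro fuel acc hf
    cases fuel with
    | zero => simp at hf
    | succ n =>
      simp at hf
      rw [pvCountGoCons, List.count_cons]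
      by_cases hch : c = h
      · subst hch; simp [ih n (acc+1) hf]; omega
      · have : (h == c) = false := by simp [Ne.symm hch]
        simp [hch, this, ih n acc hf]

theorem pvCharsCountSingleton (s : List Char) (c : Char) :
    PySem.Chars.count s [c] = s.count c := by
  rw [PySem.Chars.count]
  simp [pvCountGo c s s.length 0 le_rfl]

theorem pvOfListMap {α β : Type} [BEq α] [LawfulBEq α] [BEq β] [LawfulBEq β] (f : α → β)
    (hf : Function.Injective f) (l : List α) :
    PySem.Set.ofList (l.map f) = (PySem.Set.ofList l : List α).map f := by
  induction l using List.reverseRecOn with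
  | nil => simp [PySem.Set.ofList, PySem.Set.empty]
  | append_singleton xs x ih =>
    rw [List.map_append, List.map_singleton, PySem.Set.ofList_append_singleton,
        PySem.Set.ofList_append_singleton, ih]
    rw [PySem.Set.add_eq_ite, PySem.Set.add_eq_ite]
    by_cases hmem : x ∈ (PySem.Set.ofList xs : List α) <;>
      simp [hmem, List.mem_map_of_injective hf]

theorem pvMergeLoop_eq (n : Nat) : ∀ (counter s : List pvK) (acc : List (Int × List Char)),
    counter.length ≤ n → counter.Perm s → pvIsHeap counter → s.Pairwise (· ≤ ·) →
    pvMergeLoopA n counter acc = pvMergeLoopB n s acc := by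
  induction n with
  | zero => intro counter s acc _ _ _ _; rfl
  | succ n ih =>
  intro counter s acc hn hperm hheap hsort
  by_cases hlen : 1 < counter.length
  · have hslen : s.length = counter.length := (hperm.length_eq).symm
    rcases s with _ | ⟨s0, _ | ⟨s1, rest⟩⟩
    · simp at hslen; omega
    · simp at hslen; omega
    rcases counter with _ | ⟨c0, ct⟩
    · simp at hlen
    have hsorted : PySem.List.sorted (c0 :: ct) (fun x => x) false = s0 :: s1 :: rest :=
      PySem.List.eq_of_perm_of_pairwise_le_of_injective (fun x => x) Function.injective_id
        ((PySem.List.sorted_perm (c0 :: ct) (fun x => x) false).trans hperm)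
        (PySem.List.sorted_pairwise (c0 :: ct) (fun x => x)) hsort
    obtain ⟨c1, hpop1, hheap1, hperm1⟩ := pvHeappop_spec c0 ct hheap
    -- the root of the heap is its least element, which is the head of the sorted list
    have hc0 : c0 = s0 := by
      have h1 : c0 ≤ s0 := pvRoot_min c0 ct hheap s0 (hperm.mem_iff.mpr (by simp))
      have h2 : s0 ≤ c0 := by
        rcases List.mem_cons.mp (hperm.mem_iff.mp (List.mem_cons_self ..)) with h | h
        · exact le_of_eq h.symm
        · exact (List.pairwise_cons.mp hsort).1 c0 h
      exact le_antisymm h1 h2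
    subst hc0
    have hperm1' : c1.Perm (s1 :: rest) := hperm1.trans hperm.cons_inv
    have hc1len : c1.length = rest.length + 1 := by simpa using hperm1'.length_eq
    rcases c1 with _ | ⟨d0, dt⟩
    · simp at hc1len
    obtain ⟨c2, hpop2, hheap2, hperm2⟩ := pvHeappop_spec d0 dt hheap1
    have hsort1 : (s1 :: rest).Pairwise (· ≤ ·) := (List.pairwise_cons.mp hsort).2
    have hd0 : d0 = s1 := by
      have h1 : d0 ≤ s1 := pvRoot_min d0 dt hheap1 s1 (hperm1'.mem_iff.mpr (by simp))
      have h2 : s1 ≤ d0 := by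
        rcases List.mem_cons.mp (hperm1'.mem_iff.mp (List.mem_cons_self ..)) with h | h
        · exact le_of_eq h.symm
        · exact (List.pairwise_cons.mp hsort1).1 d0 h
      exact le_antisymm h1 h2
    subst hd0
    have hperm2' : c2.Perm rest := hperm2.trans hperm1'.cons_inv
    have hns : pvNsmallest2 (c0 :: ct) = [c0, d0] := by
      rw [pvNsmallest2, hsorted]
      rfl
    -- one unfolding of each loop
    rw [pvMergeLoopA, pvMergeLoopB, if_pos hlen, hns]
    simp only [hpop1, hpop2]
    obtain ⟨hheap3, hperm3⟩ :=
      pvHeappush_spec c2 (toLex ((ofLex c0).1 + (ofLex d0).1, (ofLex c0).2 ++ (ofLex d0).2)) hheap2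
    apply ih
    · have h3 := hperm3.length_eq
      simp only [List.length_cons] at h3 ⊢
      rw [h3, hperm2'.length_eq]
      simp only [List.length_cons] at hn hslen
      omega
    · exact hperm3.trans ((hperm2'.cons _).trans (pvInsort_perm _ rest).symm)
    · exact hheap3
    · exact pvInsort_pairwise _ rest (List.pairwise_cons.mp hsort1).2
  · rw [pvMergeLoopA, if_neg hlen]
    have hs2 : s.length ≤ 1 := by rw [← hperm.length_eq]; omega
    rcases s with _ | ⟨x, _ | ⟨y, r⟩⟩
    · rw [pvMergeLoopB]
      intro m0 m1 tl h
      exact absurd h (by simp)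
    · rw [pvMergeLoopB]
      intro m0 m1 tl h
      exact absurd h (by simp)
    · simp at hs2

theorem pvInitEq (cs : List Char) :
    PySem.Set.ofList (cs.map (fun c => toLex ((PySem.Chars.count cs [c] : Int), [c]))) =
      ((cs.foldl (fun d c => d.insert c (d.getD c 0 + 1)) PySem.Dict.empty : PySem.Dict Char Int).items.map
        (fun p => toLex ((p.2 : Int), [p.1]))) := by
  rw [PySem.Dict.foldl_insert_getD_add_one_eq_counter, PySem.Dict.items_counter, List.map_map]
  have hf : Function.Injective (fun c : Char => toLex ((PySem.Chars.count cs [c] : Int), [c])) := by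
    intro a b h
    have h2 := congrArg (fun x : pvK => (ofLex x).2) h
    simp at h2
    exact h2
  rw [pvOfListMap _ hf cs]
  apply List.map_congr_left
  intro c _
  simp [Function.comp, pvCharsCountSingleton]

-- ===== VERDICT (by name: the statement is the Claim_ definition above) =====
theorem create_heap_spec : Claim_equal_create_heap := by
  unfold Claim_equal_create_heap Spec_create_heap
  intro text _
  unfold create_heap create_heap_alt
  simp only []
  rw [← pvInitEq text.toList]
  have hsize : ((text.toList.foldl (fun d c => d.insert c (d.getD c 0 + 1)) PySem.Dict.empty :
      PySem.Dict Char Int)).size = (PySem.Set.ofList text.toList).length := by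
    rw [PySem.Dict.foldl_insert_getD_add_one_eq_counter, PySem.Dict.size,
      PySem.Dict.items_counter, List.length_map]
  rw [hsize]
  by_cases hc : (PySem.Set.ofList text.toList).length < 2
  · rw [if_pos hc, if_pos hc]
  · rw [if_neg hc, if_neg hc]
    congr 1
    set L := PySem.List.sorted
      (PySem.Set.ofList (text.toList.map
        (fun c => toLex ((PySem.Chars.count text.toList [c] : Int), [c])))) (fun x => x) false with hL
    have hpw : L.Pairwise (· ≤ ·) := PySem.List.sorted_pairwise _ _
    exact pvMergeLoop_eq L.length L L [] le_rfl (List.Perm.refl L) (pvSorted_isHeap L hpw) hpw
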